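-- pv_equiv track=rewrite | github.com/melisadigiacomo/python-scripts | papersize_ISO216.py | hojas_ISO
-- ===== SOURCE A (Python) =====
-- def hojas_ISO(N):
--     '''Función recursiva que devuelve el ancho y el largo de la hoja A(N).
--     Pre: N mayor a 0
--     Pos:devuelve el ancho y el largo de la hoja A(N)'''
--
--     if N == 0: #Caso baso, hoja A0
--         ancho = 841
--         largo = 1189
--     else:
--         medidas = hojas_ISO(N-1)    #Caso recursivo
--         ancho = medidas[1]//2       #Ancho= divisón entera a la mitad del largo de la hoja anterior
--         largo = medidas[0]          #Largo= el ancho de la hoja anterior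
--     return ancho, largo
-- ===== SOURCE B (Python) =====
-- def hojas_ISO(N):
--     '''Iterative version: carry (ancho, largo) from A0 and halve N times.'''
--     ancho, largo = 841, 1189
--     for _ in range(N):
--         ancho, largo = largo // 2, ancho
--     return ancho, largo
-- ===== Notes on version B (the rewrite author's own statement) =====
-- stated objective: faster
-- what changed: Replaces the N-deep recursion with a single iterative loop carrying the (ancho, largo) pair, removing Python call overhead and the recursion-depth limit.
import Mathlib
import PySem

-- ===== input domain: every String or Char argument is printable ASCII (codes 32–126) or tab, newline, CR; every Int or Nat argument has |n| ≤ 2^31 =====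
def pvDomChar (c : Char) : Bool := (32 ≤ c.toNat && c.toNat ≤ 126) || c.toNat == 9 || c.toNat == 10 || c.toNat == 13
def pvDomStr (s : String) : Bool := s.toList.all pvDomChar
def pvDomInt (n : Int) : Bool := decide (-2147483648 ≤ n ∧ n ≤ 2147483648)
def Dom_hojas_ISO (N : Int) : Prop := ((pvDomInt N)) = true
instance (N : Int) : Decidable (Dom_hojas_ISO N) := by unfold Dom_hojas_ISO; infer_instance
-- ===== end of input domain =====

-- B replaces A's N-deep recursion by one iterative loop over the (ancho, largo) pair.

-- ===== PORT A =====
-- A's recursion on a nonnegative N, step for step; hojas_ISO enters it at N.toNat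
-- (exact for N ≥ 0, which Pre_hojas_ISO requires; on N < 0 the Python recursion raises RecursionError).
def hojasISOrec : Nat → Int × Int
  | 0 => (841, 1189)
  | n + 1 =>
      let medidas := hojasISOrec n
      (PySem.Int.floordiv medidas.2 2, medidas.1)

def hojas_ISO (N : Int) : Int × Int := hojasISOrec N.toNat

-- ===== PORT B =====
def hojas_ISO_alt (N : Int) : Int × Int :=
  (PySem.List.pyRange 0 N 1).foldl
    (fun p _ => (PySem.Int.floordiv p.2 2, p.1)) (841, 1189)

-- ===== PRECONDITION & SPEC =====
-- Pre_ excludes N < 0, on which Python A raises RecursionError (no return value).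
def Pre_hojas_ISO (N : Int) : Prop := 0 ≤ N
instance (N : Int) : Decidable (Pre_hojas_ISO N) := by unfold Pre_hojas_ISO; infer_instance
def pvWitness_hojas_ISO : Int := 4

def Spec_hojas_ISO (N : Int) (out : Int × Int) : Prop := out = hojas_ISO_alt N
instance (N : Int) (out : Int × Int) : Decidable (Spec_hojas_ISO N out) := by unfold Spec_hojas_ISO; infer_instance

-- ===== CLAIM (what is proved, stated in full; the proofs are below) =====
def Claim_equal_hojas_ISO : Prop := ∀ (N : Int), Dom_hojas_ISO N → Pre_hojas_ISO N → Spec_hojas_ISO N (hojas_ISO N)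

-- ===== LEMMAS AND PROOFS =====
-- The iterative fold over range(n) computes exactly A's recursion at depth n.
theorem foldl_eq_rec (n : Nat) :
    (PySem.List.pyRange 0 (n : Int) 1).foldl
      (fun p _ => (PySem.Int.floordiv p.2 2, p.1)) (841, 1189) = hojasISOrec n := by
  induction n with
  | zero => simp [PySem.List.pyRange_one_eq_nil, hojasISOrec]
  | succ k ih =>
      rw [show ((k + 1 : Nat) : Int) = (k : Int) + 1 by push_cast; ring,
        PySem.List.pyRange_one_succ_right (Int.natCast_nonneg k),
        List.foldl_append, ih]
      rfl

-- ===== VERDICT (by name: the statement is the Claim_ definition above) =====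
theorem hojas_ISO_spec : Claim_equal_hojas_ISO := by
  intro N _ hPre
  have h0 : 0 ≤ N := hPre
  unfold Spec_hojas_ISO hojas_ISO hojas_ISO_alt
  rw [show N = ((N.toNat : Nat) : Int) by omega]
  simp only [Int.toNat_natCast]
  exact (foldl_eq_rec N.toNat).symm
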